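-- pv_equiv track=rewrite | github.com/StevenG69/Principles-of-Programming | Quiz/Quiz02/quiz_2_sol.py | apply_pattern_to_list
-- ===== SOURCE A (Python) =====
-- def apply_pattern_to_list(L, pattern='+-', from_start=True):
--     increment = 1 if from_start else -1
--     D = {}
--     # Position in pattern
--     j = 0 if from_start else -1
--     # Position in current state of list
--     i = 0 if from_start else -1
--     # Position in original list
--     k = 1 if from_start else -2
--     for _ in range(len(L) - 1):
--         if L[i] <= L[i + increment] and pattern[j] == '-':
--             D[k] = L.pop(i + increment)
--         elif L[i] >= L[i + increment] and pattern[j] == '+':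
--             D[k] = L.pop(i + increment)
--         else:
--             j = (j + increment) % len(pattern)
--             i += increment
--         k += increment
--     return D
-- ===== SOURCE B (Python) =====
-- def apply_pattern_to_list(L, pattern='+-', from_start=True):
--     # Single non-mutating pass over the original list instead of A's destructive pop-scan;
--     # note: unlike A, this does not mutate L.  Equivalence is about the return value.
--     D = {}
--     n = len(L)
--     if n < 2:
--         return D
--     if from_start:
--         j = 0
--         cur = L[0]
--         for k in range(1, n):
--             x = L[k]
--             if (cur <= x and pattern[j] == '-') or (cur >= x and pattern[j] == '+'):
--                 D[k] = x
--             else: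
--                 j = (j + 1) % len(pattern)
--                 cur = x
--     else:
--         j = -1
--         cur = L[-1]
--         for k in range(-2, -n - 1, -1):
--             x = L[k]
--             if (cur <= x and pattern[j] == '-') or (cur >= x and pattern[j] == '+'):
--                 D[k] = x
--             else:
--                 j = (j - 1) % len(pattern)
--                 cur = x
--     return D
-- ===== Notes on version B (the rewrite author's own statement) =====
-- stated objective: alternative
-- what changed: B replaces A's destructive scan that repeatedly calls list.pop on a shrinking copy of the list by a single non-mutating pass over the original list, keeping only the last kept value and the cyclic pattern position; B does not mutate L (A does).
import Mathlib
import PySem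

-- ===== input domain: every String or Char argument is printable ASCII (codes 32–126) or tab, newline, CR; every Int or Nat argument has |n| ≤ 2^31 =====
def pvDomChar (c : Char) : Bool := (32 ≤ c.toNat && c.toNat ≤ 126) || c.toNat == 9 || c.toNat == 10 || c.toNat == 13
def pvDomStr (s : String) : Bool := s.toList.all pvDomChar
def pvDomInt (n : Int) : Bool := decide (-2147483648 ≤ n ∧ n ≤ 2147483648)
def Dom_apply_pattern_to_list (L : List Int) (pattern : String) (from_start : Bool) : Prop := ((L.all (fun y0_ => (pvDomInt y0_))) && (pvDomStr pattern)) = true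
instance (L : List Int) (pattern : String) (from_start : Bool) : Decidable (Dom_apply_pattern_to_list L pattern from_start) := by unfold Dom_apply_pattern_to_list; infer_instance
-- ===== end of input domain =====

-- B replaces A's repeated list.pop mutation by a single pass over the original list
-- (same return value; A mutates its argument L in place, B does not — the claim is about the return value only).

-- ===== PORT A =====
-- state: (current list L, dict D, i, j, k); none = an exception was raised
def pvAState : Type := List Int × PySem.Dict Int Int × Int × Int × Int

-- one iteration of A's for-loop (pattern[j] is evaluated up front: Python always reaches it,
-- since L[i] <= L[i+inc] or L[i] >= L[i+inc] always holds)
def pvaStep (pattern : String) (inc : Int) : Option pvAState → Option pvAState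
  | none => none
  | some (l, d, i, j, k) =>
    match PySem.List.pyGet? l i, PySem.List.pyGet? l (i + inc), PySem.Str.pyGet? pattern j with
    | some a, some b, some p =>
      if a ≤ b ∧ p = '-' then
        match PySem.List.pop? l (i + inc) with
        | some (v, l') => some (l', d.insert k v, i, j, k + inc)
        | none => none
      else if b ≤ a ∧ p = '+' then
        match PySem.List.pop? l (i + inc) with
        | some (v, l') => some (l', d.insert k v, i, j, k + inc)
        | none => none
      else
        some (l, d, i + inc, PySem.Int.mod (j + inc) (PySem.Str.len pattern), k + inc)
    | _, _, _ => none

def apply_pattern_to_list (L : List Int) (pattern : String) (from_start : Bool) : List (Int × Int) :=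
  let inc : Int := if from_start then 1 else -1
  let j0 : Int := if from_start then 0 else -1
  let i0 : Int := if from_start then 0 else -1
  let k0 : Int := if from_start then 1 else -2
  match (List.range (L.length - 1)).foldl (fun st _ => pvaStep pattern inc st)
      (some (L, PySem.Dict.empty, i0, j0, k0)) with
  | some (_, d, _, _, _) => d.items
  | none => []

-- ===== PORT B =====
-- pattern[j]; total stand-in (inside Pre_ the index is always in range, so the default is never used)
def pvPj (pattern : String) (j : Int) : Char := (PySem.Str.pyGet? pattern j).getD ' '

-- forward loop of Source B: one pass, cur = last kept element
def pvGoF (pattern : String) (m : Int) : Int → Int → List Int → Int → PySem.Dict Int Int → PySem.Dict Int Int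
  | _, _, [], _, d => d
  | cur, j, x :: rest, k, d =>
    if (cur ≤ x ∧ pvPj pattern j = '-') ∨ (x ≤ cur ∧ pvPj pattern j = '+') then
      pvGoF pattern m cur j rest (k + 1) (d.insert k x)
    else
      pvGoF pattern m x (PySem.Int.mod (j + 1) m) rest (k + 1) d

-- backward loop of Source B: iterates L[k] for k = -2, -3, …, i.e. over the reversed list
def pvGoB (pattern : String) (m : Int) : Int → Int → List Int → Int → PySem.Dict Int Int → PySem.Dict Int Int
  | _, _, [], _, d => d
  | cur, j, x :: rest, k, d =>
    if (cur ≤ x ∧ pvPj pattern j = '-') ∨ (x ≤ cur ∧ pvPj pattern j = '+') then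
      pvGoB pattern m cur j rest (k - 1) (d.insert k x)
    else
      pvGoB pattern m x (PySem.Int.mod (j - 1) m) rest (k - 1) d

def apply_pattern_to_list_alt (L : List Int) (pattern : String) (from_start : Bool) : List (Int × Int) :=
  if L.length < 2 then []
  else
    let m : Int := PySem.Str.len pattern
    if from_start then
      match L with
      | [] => []
      | c :: rest => (pvGoF pattern m c 0 rest 1 PySem.Dict.empty).items
    else
      match L.reverse with
      | [] => []
      | c :: restRev => (pvGoB pattern m c (-1) restRev (-2) PySem.Dict.empty).items

-- ===== PRECONDITION & SPEC =====
-- A raises IndexError (pattern[j] on an empty pattern) exactly when len(L) ≥ 2 and pattern = ''; B raises there too.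
def Pre_apply_pattern_to_list (L : List Int) (pattern : String) (from_start : Bool) : Prop :=
  L.length < 2 ∨ 0 < PySem.Str.len pattern
instance (L : List Int) (pattern : String) (from_start : Bool) : Decidable (Pre_apply_pattern_to_list L pattern from_start) := by unfold Pre_apply_pattern_to_list; infer_instance

def pvWitness_apply_pattern_to_list : List Int × String × Bool := ([1, 2, 3], "+-", true)

def Spec_apply_pattern_to_list (L : List Int) (pattern : String) (from_start : Bool) (out : List (Int × Int)) : Prop := out = apply_pattern_to_list_alt L pattern from_start
instance (L : List Int) (pattern : String) (from_start : Bool) (out : List (Int × Int)) : Decidable (Spec_apply_pattern_to_list L pattern from_start out) := by unfold Spec_apply_pattern_to_list; infer_instance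

-- ===== CLAIM (what is proved, stated in full; the proofs are below) =====
def Claim_equal_apply_pattern_to_list : Prop := ∀ (L : List Int) (pattern : String) (from_start : Bool), Dom_apply_pattern_to_list L pattern from_start → Pre_apply_pattern_to_list L pattern from_start → Spec_apply_pattern_to_list L pattern from_start (apply_pattern_to_list L pattern from_start)

-- ===== LEMMAS AND PROOFS =====

theorem pv_foldl_range_const {α : Type} (f : α → α) (x : α) (n : Nat) :
    (List.range n).foldl (fun st _ => f st) x = f^[n] x := by
  induction n generalizing x with
  | zero => simp
  | succ n ih =>
    rw [List.range_succ, List.foldl_append, ih, Function.iterate_succ_apply']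
    simp

theorem pv_eraseIdx_append (K S : List Int) (x : Int) :
    (K ++ x :: S).eraseIdx K.length = K ++ S := by
  induction K with
  | nil => rfl
  | cons a K ih => simpa using ih

theorem pv_pyGet_pattern (pattern : String) (j : Int)
    (h1 : -PySem.Str.len pattern ≤ j) (h2 : j < PySem.Str.len pattern) :
    PySem.Str.pyGet? pattern j = some (pvPj pattern j) := by
  rw [PySem.Str.len_eq] at h1 h2
  have hex : ∃ c, PySem.List.pyGet? pattern.toList j = some c := by
    by_cases hj : 0 ≤ j
    · rw [PySem.List.pyGet?_of_nonneg _ hj]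
      exact ⟨_, List.getElem?_eq_getElem (by omega)⟩
    · rw [PySem.List.pyGet?_neg _ (by omega) (by omega)]
      exact ⟨_, List.getElem?_eq_getElem (by omega)⟩
  obtain ⟨c, hc⟩ := hex
  have hc' : PySem.Str.pyGet? pattern j = some c := hc
  rw [hc']
  have hp : pvPj pattern j = c := by
    unfold pvPj
    rw [hc']
    rfl
  rw [hp]

theorem pv_pop_append (K S : List Int) (x : Int) :
    PySem.List.pop? (K ++ x :: S) ((K.length : Int)) = some (x, K ++ S) := by
  rw [PySem.List.pop?_natCast _ _ (by simp)]
  rw [pv_eraseIdx_append]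
  congr 2
  rw [List.getElem_append_right (by omega)]
  simp

theorem pv_pop_neg (xs : List Int) (k : Nat) (h0 : 0 < k) (h : k ≤ xs.length) :
    PySem.List.pop? xs (-(k : Int)) =
      some (xs[xs.length - k]'(by omega), xs.eraseIdx (xs.length - k)) := by
  simp only [PySem.List.pop?, PySem.List.pyIdx?]
  rw [if_neg (by omega), if_pos (by omega)]
  have h1 : (-(-(k : Int))).toNat = k := by omega
  rw [h1]
  simp [List.getElem?_eq_getElem (show xs.length - k < xs.length by omega)]

theorem pv_fwd (pattern : String) (hm : 0 < PySem.Str.len pattern) :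
    ∀ (S K : List Int) (hK : K ≠ []) (d : PySem.Dict Int Int) (j k : Int),
      -PySem.Str.len pattern ≤ j → j < PySem.Str.len pattern →
      ∃ l' i' j' k',
        (pvaStep pattern 1)^[S.length] (some (K ++ S, d, (K.length : Int) - 1, j, k)) =
          some (l', pvGoF pattern (PySem.Str.len pattern) (K.getLast hK) j S k d, i', j', k') := by
  intro S
  induction S with
  | nil =>
    intro K hK d j k hj1 hj2
    refine ⟨K ++ [], (K.length : Int) - 1, j, k, ?_⟩
    simp only [List.length_nil, Function.iterate_zero, id_eq]
    rfl
  | cons x S' ih =>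
    intro K hK d j k hj1 hj2
    have hKpos : 0 < K.length := List.length_pos_iff.mpr hK
    rw [List.length_cons, Function.iterate_succ_apply]
    have hpj := pv_pyGet_pattern pattern j hj1 hj2
    have hga : PySem.List.pyGet? (K ++ x :: S') ((K.length : Int) - 1) = some (K.getLast hK) := by
      have h1 : (K.length : Int) - 1 = ((K.length - 1 : Nat) : Int) := by push_cast [hKpos]; omega
      rw [h1, PySem.List.pyGet?_natCast, List.getElem?_append_left (by omega),
        List.getElem?_eq_getElem (by omega)]
      simp [List.getLast_eq_getElem]
    have hgb : PySem.List.pyGet? (K ++ x :: S') ((K.length : Int) - 1 + 1) = some x := by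
      rw [show (K.length : Int) - 1 + 1 = ((K.length : Nat) : Int) by ring,
        PySem.List.pyGet?_append_length]
    have hpop : PySem.List.pop? (K ++ x :: S') ((K.length : Int) - 1 + 1) = some (x, K ++ S') := by
      rw [show (K.length : Int) - 1 + 1 = ((K.length : Nat) : Int) by ring, pv_pop_append]
    simp only [pvaStep, hga, hgb, hpj, hpop]
    by_cases c1 : K.getLast hK ≤ x ∧ pvPj pattern j = '-'
    · rw [if_pos c1]
      have hrhs : pvGoF pattern (PySem.Str.len pattern) (K.getLast hK) j (x :: S') k d =
          pvGoF pattern (PySem.Str.len pattern) (K.getLast hK) j S' (k + 1) (d.insert k x) := by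
        rw [pvGoF, if_pos (Or.inl c1)]
      rw [hrhs]
      exact ih K hK (d.insert k x) j (k + 1) hj1 hj2
    · rw [if_neg c1]
      by_cases c2 : x ≤ K.getLast hK ∧ pvPj pattern j = '+'
      · rw [if_pos c2]
        have hrhs : pvGoF pattern (PySem.Str.len pattern) (K.getLast hK) j (x :: S') k d =
            pvGoF pattern (PySem.Str.len pattern) (K.getLast hK) j S' (k + 1) (d.insert k x) := by
          rw [pvGoF, if_pos (Or.inr c2)]
        rw [hrhs]
        exact ih K hK (d.insert k x) j (k + 1) hj1 hj2
      · rw [if_neg c2]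
        have hK' : K ++ [x] ≠ [] := by simp
        have hlast : (K ++ [x]).getLast hK' = x := List.getLast_concat
        have hrhs : pvGoF pattern (PySem.Str.len pattern) (K.getLast hK) j (x :: S') k d =
            pvGoF pattern (PySem.Str.len pattern) ((K ++ [x]).getLast hK')
              (PySem.Int.mod (j + 1) (PySem.Str.len pattern)) S' (k + 1) d := by
        --
          rw [pvGoF, if_neg (by tauto), hlast]
        rw [hrhs]
        have hst : (K ++ x :: S', d, (K.length : Int) - 1 + 1, PySem.Int.mod (j + 1) (PySem.Str.len pattern), k + 1)
            = ((K ++ [x]) ++ S', d, (((K ++ [x]).length : Int)) - 1, PySem.Int.mod (j + 1) (PySem.Str.len pattern), k + 1) := by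
          simp
        rw [hst]
        exact ih (K ++ [x]) hK' d _ (k + 1)
          (le_trans (by omega) (PySem.Int.mod_nonneg _ hm)) (PySem.Int.mod_lt _ hm)

theorem pv_pyGet_neg_head (P R : List Int) (hR : R ≠ []) :
    PySem.List.pyGet? (P ++ R) (-(R.length : Int)) = some (R.head hR) := by
  have hRpos : 0 < R.length := List.length_pos_iff.mpr hR
  rw [PySem.List.pyGet?_neg_natCast _ _ hRpos (by simp)]
  rw [show (P ++ R).length - R.length = P.length by simp]
  rw [List.getElem?_append_right (le_refl _)]
  cases R with
  | nil => exact absurd rfl hR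
  | cons r R' => simp

theorem pv_pyGet_neg_snd (P R : List Int) (x : Int) :
    PySem.List.pyGet? (P ++ x :: R) (-(((R.length + 1 : Nat)) : Int)) = some x := by
  rw [PySem.List.pyGet?_neg_natCast _ _ (by omega) (by simp)]
  rw [show (P ++ x :: R).length - (R.length + 1) = P.length by simp]
  rw [List.getElem?_append_right (le_refl _)]
  simp

theorem pv_pop_neg_append (P R : List Int) (x : Int) :
    PySem.List.pop? (P ++ x :: R) (-(((R.length + 1 : Nat)) : Int)) = some (x, P ++ R) := by
  rw [pv_pop_neg _ _ (by omega) (by simp)]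
  have hidx : (P ++ x :: R).length - (R.length + 1) = P.length := by simp
  simp only [hidx, pv_eraseIdx_append]
  congr 2
  rw [List.getElem_append_right (le_refl _)]
  simp

theorem pv_bwd (pattern : String) (hm : 0 < PySem.Str.len pattern) :
    ∀ (T R : List Int) (hR : R ≠ []) (d : PySem.Dict Int Int) (j k : Int),
      -PySem.Str.len pattern ≤ j → j < PySem.Str.len pattern →
      ∃ l' i' j' k',
        (pvaStep pattern (-1))^[T.length] (some (T.reverse ++ R, d, -(R.length : Int), j, k)) =
          some (l', pvGoB pattern (PySem.Str.len pattern) (R.head hR) j T k d, i', j', k') := by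
  intro T
  induction T with
  | nil =>
    intro R hR d j k hj1 hj2
    refine ⟨[].reverse ++ R, -(R.length : Int), j, k, ?_⟩
    simp only [List.length_nil, Function.iterate_zero, id_eq]
    rfl
  | cons x T' ih =>
    intro R hR d j k hj1 hj2
    have hRpos : 0 < R.length := List.length_pos_iff.mpr hR
    rw [List.length_cons, Function.iterate_succ_apply]
    have hpj := pv_pyGet_pattern pattern j hj1 hj2
    have hl : (x :: T').reverse ++ R = T'.reverse ++ (x :: R) := by simp
    have hcast : -(R.length : Int) + -1 = -(((R.length + 1 : Nat)) : Int) := by push_cast; ring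
    have hga : PySem.List.pyGet? ((x :: T').reverse ++ R) (-(R.length : Int)) = some (R.head hR) :=
      pv_pyGet_neg_head _ R hR
    have hgb : PySem.List.pyGet? ((x :: T').reverse ++ R) (-(R.length : Int) + -1) = some x := by
      rw [hl, hcast]; exact pv_pyGet_neg_snd T'.reverse R x
    have hpop : PySem.List.pop? ((x :: T').reverse ++ R) (-(R.length : Int) + -1) =
        some (x, T'.reverse ++ R) := by
      rw [hl, hcast]; exact pv_pop_neg_append T'.reverse R x
    simp only [pvaStep, hga, hgb, hpj, hpop]
    by_cases c1 : R.head hR ≤ x ∧ pvPj pattern j = '-'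
    · rw [if_pos c1]
      have hrhs : pvGoB pattern (PySem.Str.len pattern) (R.head hR) j (x :: T') k d =
          pvGoB pattern (PySem.Str.len pattern) (R.head hR) j T' (k - 1) (d.insert k x) := by
        rw [pvGoB, if_pos (Or.inl c1)]
      rw [hrhs, show k + (-1 : Int) = k - 1 by ring]
      exact ih R hR (d.insert k x) j (k - 1) hj1 hj2
    · rw [if_neg c1]
      by_cases c2 : x ≤ R.head hR ∧ pvPj pattern j = '+'
      · rw [if_pos c2]
        have hrhs : pvGoB pattern (PySem.Str.len pattern) (R.head hR) j (x :: T') k d =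
            pvGoB pattern (PySem.Str.len pattern) (R.head hR) j T' (k - 1) (d.insert k x) := by
          rw [pvGoB, if_pos (Or.inr c2)]
        rw [hrhs, show k + (-1 : Int) = k - 1 by ring]
        exact ih R hR (d.insert k x) j (k - 1) hj1 hj2
      · rw [if_neg c2]
        have hR' : x :: R ≠ [] := by simp
        have hrhs : pvGoB pattern (PySem.Str.len pattern) (R.head hR) j (x :: T') k d =
            pvGoB pattern (PySem.Str.len pattern) ((x :: R).head hR')
              (PySem.Int.mod (j - 1) (PySem.Str.len pattern)) T' (k - 1) d := by
          rw [pvGoB, if_neg (by tauto)]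
          rfl
        rw [hrhs, hl,
          show -(R.length : Int) + -1 = -(((x :: R).length : Nat) : Int) by push_cast [List.length_cons]; ring,
          show j + (-1 : Int) = j - 1 by ring,
          show k + (-1 : Int) = k - 1 by ring]
        exact ih (x :: R) hR' d _ (k - 1)
          (le_trans (by omega) (PySem.Int.mod_nonneg _ hm)) (PySem.Int.mod_lt _ hm)

-- ===== VERDICT (by name: the statement is the Claim_ definition above) =====
theorem apply_pattern_to_list_spec : Claim_equal_apply_pattern_to_list := by
  intro L pattern fs hdom hpre
  unfold Spec_apply_pattern_to_list
  rcases L with _ | ⟨c, rest⟩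
  · cases fs <;> simp [apply_pattern_to_list, apply_pattern_to_list_alt, PySem.Dict.empty]
  · rcases rest with _ | ⟨c2, rest2⟩
    · cases fs <;> simp [apply_pattern_to_list, apply_pattern_to_list_alt, PySem.Dict.empty]
    · have hm : 0 < PySem.Str.len pattern := by
        rcases hpre with h | h
        · simp at h
        · exact h
      cases fs with
      | true =>
        obtain ⟨l', i', j', k', h⟩ :=
          pv_fwd pattern hm (c2 :: rest2) [c] (by simp) PySem.Dict.empty 0 1 (by omega) (by omega)
        simp only [List.singleton_append, List.length_cons, List.length_nil, Nat.zero_add,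
          Nat.cast_one, sub_self] at h
        unfold apply_pattern_to_list apply_pattern_to_list_alt
        simp only [if_true, List.length_cons, Nat.add_sub_cancel]
        rw [pv_foldl_range_const, h]
        rw [if_neg (by omega)]
        simp
      | false =>
        rcases hrev : (c :: c2 :: rest2).reverse with _ | ⟨e, er⟩
        · exact absurd hrev (by simp)
        · have hLeq : c :: c2 :: rest2 = er.reverse ++ [e] := by
            have := congrArg List.reverse hrev
            simpa using this
          have hcnt : er.length = rest2.length + 1 := by
            have := congrArg List.length hrev
            simp at this
            omega
          obtain ⟨l', i', j', k', h⟩ :=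
            pv_bwd pattern hm er [e] (by simp) PySem.Dict.empty (-1) (-2) (by omega) (by omega)
          rw [← hLeq, hcnt] at h
          simp only [List.length_singleton, Nat.cast_one, List.head_cons] at h
          unfold apply_pattern_to_list apply_pattern_to_list_alt
          simp only [Bool.false_eq_true, if_false, List.length_cons, Nat.add_sub_cancel]
          rw [pv_foldl_range_const, h, hrev]
          rw [if_neg (by omega)]
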